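-- pv_equiv track=rewrite | github.com/quinndupont/gpm | scripts/eval/rhyme_analyzer.py | _compress_stanza_starts_for_valid_words
-- ===== SOURCE A (Python) =====
-- def _clean_word(word: str) -> str:
--     """Strip surrounding punctuation and lowercase.
--
--     Uses Unicode-aware trimming so em dashes, curly quotes, and other marks
--     not in ``string.punctuation`` (e.g. ``\\u2014``) do not break CMU lookup.
--     """
--     w = word.strip().lower()
--     if not w:
--         return ""
--     while w and not w[0].isalpha():
--         w = w[1:]
--     while w and not w[-1].isalpha():
--         w = w[:-1]
--     return w
--
-- def _get_end_word(line: str) -> str: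
--     """Extract the last word from a line, handling trailing punctuation.
--
--     Trailing stand-alone dashes or quotes (e.g. ``to be —``) become their own
--     tokens after split; skip backward until a token with alphabetic content.
--     """
--     tokens = line.strip().split()
--     if not tokens:
--         return ""
--     for tok in reversed(tokens):
--         w = _clean_word(tok)
--         if w:
--             return w
--     return ""
--
-- def _compress_stanza_starts_for_valid_words(
--     lines: list[str],
--     stanza_starts: list[int],
-- ) -> list[int]:
--     """Map stanza boundaries from full ``lines`` to indices in the list of non-empty end-words."""
--     if not lines:
--         return [0]
--     start_set = set(stanza_starts)
--     compressed: list[int] = []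
--     out_idx = 0
--     for i, line in enumerate(lines):
--         w = _get_end_word(line)
--         if not w:
--             continue
--         if i in start_set:
--             compressed.append(out_idx)
--         out_idx += 1
--     if not compressed:
--         return [0]
--     if compressed[0] != 0:
--         compressed.insert(0, 0)
--     return sorted(set(compressed))
-- ===== SOURCE B (Python) =====
-- def _clean_word(word: str) -> str:
--     w = word.strip().lower()
--     if not w:
--         return ""
--     while w and not w[0].isalpha():
--         w = w[1:]
--     while w and not w[-1].isalpha():
--         w = w[:-1]
--     return w
--
-- def _get_end_word(line: str) -> str:
--     tokens = line.strip().split()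
--     if not tokens:
--         return ""
--     for tok in reversed(tokens):
--         w = _clean_word(tok)
--         if w:
--             return w
--     return ""
--
-- def _compress_stanza_starts_for_valid_words(lines, stanza_starts):
--     if not lines:
--         return [0]
--     ok = [bool(_get_end_word(line)) for line in lines]
--     pref = [0]
--     for v in ok:
--         pref.append(pref[-1] + v)
--     mapped = {pref[s] for s in set(stanza_starts)
--               if 0 <= s < len(lines) and ok[s]}
--     if not mapped:
--         return [0]
--     return sorted(mapped | {0})
-- ===== Notes on version B (the rewrite author's own statement) =====
-- stated objective: alternative
-- what changed: Instead of one enumerate-loop over all lines carrying a running output counter and appending when a line index is a stanza start, B precomputes a prefix-count table of lines with a valid end word and maps each stanza start directly to its compressed index (count of valid lines before it), always unioning in 0 and sorting.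
import Mathlib
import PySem

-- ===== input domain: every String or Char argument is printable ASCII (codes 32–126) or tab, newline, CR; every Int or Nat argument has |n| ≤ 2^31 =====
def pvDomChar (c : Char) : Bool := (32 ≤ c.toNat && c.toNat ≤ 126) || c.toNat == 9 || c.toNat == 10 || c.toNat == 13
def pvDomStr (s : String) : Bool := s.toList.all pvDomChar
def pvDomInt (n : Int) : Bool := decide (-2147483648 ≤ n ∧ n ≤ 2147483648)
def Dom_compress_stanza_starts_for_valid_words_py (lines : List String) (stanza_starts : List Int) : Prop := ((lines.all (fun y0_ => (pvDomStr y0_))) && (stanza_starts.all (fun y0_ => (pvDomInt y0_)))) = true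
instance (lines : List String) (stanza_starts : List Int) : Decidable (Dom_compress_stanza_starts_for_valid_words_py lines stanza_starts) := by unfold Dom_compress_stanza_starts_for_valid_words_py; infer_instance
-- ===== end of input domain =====

-- B replaces A's single enumerate-loop with a running output counter by a per-start
-- arithmetic mapping (prefix count of valid lines), iterating over the stanza starts
-- instead of over all lines; objective: alternative decomposition, same return value.

-- ===== PORT A =====
-- shared helper _clean_word: the two while-loops stripping non-alphabetic characters
def pvDropFrontNonAlpha : List Char → List Char
  | [] => []
  | c :: cs => if PySem.Chars.isalpha c = false then pvDropFrontNonAlpha cs else c :: cs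

def pvDropBackNonAlpha (w : List Char) : List Char :=
  match h : w.getLast? with  -- h is cited in decreasing_by
  | none => w
  | some c => if PySem.Chars.isalpha c = false then pvDropBackNonAlpha w.dropLast else w
termination_by w.length
decreasing_by
  have hne : w ≠ [] := by intro hw; simp [hw] at h
  have := List.length_pos_iff.mpr hne
  simp [List.length_dropLast]
  omega

def clean_word_py (word : String) : String :=
  let w := PySem.Chars.lower (PySem.Chars.strip word.toList)
  if w = [] then ""
  else String.ofList (pvDropBackNonAlpha (pvDropFrontNonAlpha w))

-- the 'for tok in reversed(tokens)' loop of _get_end_word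
def pvEndLoop : List (List Char) → String
  | [] => ""
  | t :: ts => let w := clean_word_py (String.ofList t); if w ≠ "" then w else pvEndLoop ts

def get_end_word_py (line : String) : String :=
  let tokens := PySem.Chars.split₀ (PySem.Chars.strip line.toList)
  if tokens = [] then ""
  else pvEndLoop tokens.reverse

-- the body of A's 'for i, line in enumerate(lines)' loop, on state (compressed, out_idx)
def pvStepA (S : PySem.Set Int) (s : List Int × Int) (p : Int × String) : List Int × Int :=
  let w := get_end_word_py p.2
  if w = "" then s
  else
    let comp := if S.contains p.1 then s.1 ++ [s.2] else s.1
    (comp, s.2 + 1)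

def compress_stanza_starts_for_valid_words_py (lines : List String) (stanza_starts : List Int) : List Int :=
  if lines = [] then [0]
  else
    let start_set : PySem.Set Int := PySem.Set.ofList stanza_starts
    let st := (PySem.List.enumerate lines).foldl (pvStepA start_set) ([], 0)
    let compressed := st.1
    if compressed = [] then [0]
    else
      let compressed' := if compressed.head? ≠ some 0 then 0 :: compressed else compressed
      PySem.List.sorted (PySem.Set.ofList compressed') (fun x => x) false

-- ===== PORT B =====
-- the body of B's 'for v in ok' prefix-count loop: pref.append(pref[-1] + v)
def pvStepP (p : List Int) (v : Bool) : List Int :=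
  p ++ [p.getLast! + (if v then 1 else 0)]

-- the body of B's set comprehension: guard '0 <= s < len(lines) and ok[s]', value 'pref[s]'
def pvStepB (lines : List String) (ok : List Bool) (pref : List Int) (m : PySem.Set Int) (s : Int) : PySem.Set Int :=
  if 0 ≤ s ∧ s < (lines.length : Int) ∧ (PySem.List.pyGet? ok s).getD false = true then
    m.add ((PySem.List.pyGet? pref s).getD 0)
  else m

def compress_stanza_starts_for_valid_words_py_alt (lines : List String) (stanza_starts : List Int) : List Int :=
  if lines = [] then [0]
  else
    let ok : List Bool := lines.map (fun l => get_end_word_py l != "")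
    let pref : List Int := ok.foldl pvStepP [0]
    let mapped : PySem.Set Int :=
      (PySem.Set.ofList stanza_starts).foldl (pvStepB lines ok pref) PySem.Set.empty
    if mapped = [] then [0]
    else PySem.List.sorted (PySem.Set.union mapped [0]) (fun x => x) false

-- ===== PRECONDITION & SPEC =====
def Spec_compress_stanza_starts_for_valid_words_py (lines : List String) (stanza_starts : List Int) (out : List Int) : Prop := out = compress_stanza_starts_for_valid_words_py_alt lines stanza_starts
instance (lines : List String) (stanza_starts : List Int) (out : List Int) : Decidable (Spec_compress_stanza_starts_for_valid_words_py lines stanza_starts out) := by unfold Spec_compress_stanza_starts_for_valid_words_py; infer_instance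

-- ===== CLAIM (what is proved, stated in full; the proofs are below) =====
def Claim_equal_compress_stanza_starts_for_valid_words_py : Prop := ∀ (lines : List String) (stanza_starts : List Int), Dom_compress_stanza_starts_for_valid_words_py lines stanza_starts → Spec_compress_stanza_starts_for_valid_words_py lines stanza_starts (compress_stanza_starts_for_valid_words_py lines stanza_starts)

-- ===== LEMMAS AND PROOFS =====

-- whether a line contributes an end word (shared by both characterisations)
def pvValid (l : String) : Bool := get_end_word_py l != ""

-- structural description of the list A's fold builds
def pvGA (S : PySem.Set Int) : List String → Int → Int → List Int
  | [], _, _ => []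
  | l :: rest, k, x =>
    if get_end_word_py l = "" then pvGA S rest (k + 1) x
    else (if S.contains k then [x] else []) ++ pvGA S rest (k + 1) (x + 1)

theorem pv_foldA (S : PySem.Set Int) (lines : List String) (k : Int) (c0 : List Int) (x0 : Int) :
    ((PySem.List.enumerate lines k).foldl (pvStepA S) (c0, x0))
      = (c0 ++ pvGA S lines k x0, x0 + (lines.countP pvValid : Int)) := by
  induction lines generalizing k c0 x0 with
  | nil => simp [PySem.List.enumerate, pvGA]
  | cons l rest ih =>
    have hcons : PySem.List.enumerate (l :: rest) k = (k, l) :: PySem.List.enumerate rest (k + 1) := by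
      simp [PySem.List.enumerate]
    rw [hcons, List.foldl_cons]
    by_cases hw : get_end_word_py l = ""
    · have h1 : pvStepA S (c0, x0) (k, l) = (c0, x0) := by simp [pvStepA, hw]
      rw [h1, ih]
      simp [pvGA, hw, pvValid]
    · by_cases hc : S.contains k = true
      · have hc' : k ∈ S := (PySem.Set.contains_iff S k).mp hc
        have h1 : pvStepA S (c0, x0) (k, l) = (c0 ++ [x0], x0 + 1) := by simp [pvStepA, hw, hc']
        rw [h1, ih]
        simp only [pvGA, hw, hc, Prod.ext_iff]
        refine ⟨by simp, ?_⟩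
        simp [pvValid, hw]
        ring
      · have hc' : k ∉ S := fun hm => hc ((PySem.Set.contains_iff S k).mpr hm)
        have h1 : pvStepA S (c0, x0) (k, l) = (c0, x0 + 1) := by simp [pvStepA, hw, hc']
        rw [h1, ih]
        simp only [pvGA, hw, hc, Prod.ext_iff]
        refine ⟨by simp, ?_⟩
        simp [pvValid, hw]
        ring

set_option maxHeartbeats 1000000 in
theorem pv_gA_mem (S : PySem.Set Int) (lines : List String) (k x v : Int) :
    v ∈ pvGA S lines k x ↔
      ∃ i : Nat, i < lines.length ∧ pvValid (lines.getD i "") = true ∧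
        (k + (i : Int)) ∈ S ∧ v = x + ((lines.take i).countP pvValid : Int) := by
  induction lines generalizing k x with
  | nil => simp [pvGA]
  | cons l rest ih =>
    have hsh : ∀ i : Nat, k + 1 + (i : Int) = k + (((i + 1 : Nat)) : Int) := by
      intro i; push_cast; ring
    by_cases hw : get_end_word_py l = ""
    · rw [pvGA, if_pos hw, ih]
      constructor
      · rintro ⟨i, hi, hval, hc, hv⟩
        refine ⟨i + 1, by simpa using hi, by simpa using hval, by rw [← hsh]; exact hc, ?_⟩
        simpa [List.take_succ_cons, List.countP_cons, pvValid, hw] using hv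
      · rintro ⟨i, hi, hval, hc, hv⟩
        match i with
        | 0 => simp [pvValid, hw] at hval
        | i + 1 =>
          refine ⟨i, by simpa using hi, by simpa using hval, by rw [hsh]; exact hc, ?_⟩
          simpa [List.take_succ_cons, List.countP_cons, pvValid, hw] using hv
    · by_cases hk : k ∈ S
      · rw [pvGA, if_neg hw, if_pos ((PySem.Set.contains_iff S k).mpr hk)]
        simp only [List.mem_append, List.mem_singleton, ih]
        constructor
        · rintro (hv | ⟨i, hi, hval, hc, hv⟩)
          · exact ⟨0, by simp, by simp [pvValid, hw], by simpa using hk, by simpa using hv⟩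
          · refine ⟨i + 1, by simpa using hi, by simpa using hval, by rw [← hsh]; exact hc, ?_⟩
            simp [List.take_succ_cons, pvValid, hw] at hv ⊢
            omega
        · rintro ⟨i, hi, hval, hc, hv⟩
          match i with
          | 0 => exact Or.inl (by simpa using hv)
          | i + 1 =>
            refine Or.inr ⟨i, by simpa using hi, by simpa using hval, by rw [hsh]; exact hc, ?_⟩
            simp [List.take_succ_cons, pvValid, hw] at hv ⊢
            omega
      · rw [pvGA, if_neg hw, if_neg (by simpa [PySem.Set.contains_iff] using hk)]
        simp only [List.nil_append, ih]
        constructor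
        · rintro ⟨i, hi, hval, hc, hv⟩
          refine ⟨i + 1, by simpa using hi, by simpa using hval, by rw [← hsh]; exact hc, ?_⟩
          simp [List.take_succ_cons, pvValid, hw] at hv ⊢
          omega
        · rintro ⟨i, hi, hval, hc, hv⟩
          match i with
          | 0 => exact absurd (by simpa using hc) hk
          | i + 1 =>
            refine ⟨i, by simpa using hi, by simpa using hval, by rw [hsh]; exact hc, ?_⟩
            simp [List.take_succ_cons, pvValid, hw] at hv ⊢
            omega

theorem pv_foldB_mem (lines : List String) (ok : List Bool) (pref : List Int) (sl : List Int)
    (m0 : PySem.Set Int) (v : Int) :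
    v ∈ (sl.foldl (pvStepB lines ok pref) m0) ↔
      v ∈ m0 ∨ ∃ s ∈ sl,
        (0 ≤ s ∧ s < (lines.length : Int) ∧ (PySem.List.pyGet? ok s).getD false = true) ∧
        v = (PySem.List.pyGet? pref s).getD 0 := by
  induction sl generalizing m0 with
  | nil => simp
  | cons s rest ih =>
    rw [List.foldl_cons]
    by_cases hc : 0 ≤ s ∧ s < (lines.length : Int) ∧ (PySem.List.pyGet? ok s).getD false = true
    · rw [pvStepB, if_pos hc, ih]
      simp only [PySem.Set.mem_add]
      constructor
      · rintro ((h | h) | ⟨t, ht, hct, hv⟩)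
        · exact Or.inl h
        · exact Or.inr ⟨s, by simp, hc, h⟩
        · exact Or.inr ⟨t, by simp [ht], hct, hv⟩
      · rintro (h | ⟨t, ht, hct, hv⟩)
        · exact Or.inl (Or.inl h)
        · rcases List.mem_cons.mp ht with h' | h'
          · exact Or.inl (Or.inr (h' ▸ hv))
          · exact Or.inr ⟨t, h', hct, hv⟩
    · rw [pvStepB, if_neg hc, ih]
      constructor
      · rintro (h | ⟨t, ht, hct, hv⟩)
        · exact Or.inl h
        · exact Or.inr ⟨t, by simp [ht], hct, hv⟩
      · rintro (h | ⟨t, ht, hct, hv⟩)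
        · exact Or.inl h
        · rcases List.mem_cons.mp ht with h' | h'
          · exact absurd (h' ▸ hct) hc
          · exact Or.inr ⟨t, h', hct, hv⟩

theorem pv_foldB_nodup (lines : List String) (ok : List Bool) (pref : List Int) (sl : List Int)
    (m0 : PySem.Set Int) (h : List.Nodup m0) :
    List.Nodup (sl.foldl (pvStepB lines ok pref) m0) := by
  induction sl generalizing m0 with
  | nil => simpa
  | cons s rest ih =>
    rw [List.foldl_cons, pvStepB]
    by_cases hc : 0 ≤ s ∧ s < (lines.length : Int) ∧ (PySem.List.pyGet? ok s).getD false = true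
    · rw [if_pos hc]; exact ih _ (PySem.Set.nodup_add _ _ h)
    · rw [if_neg hc]; exact ih _ h

-- the prefix-count loop computes prefix counts of true entries
theorem pv_pref (okl : List Bool) : ∀ (acc : List Int) (c : Int),
    (okl.foldl pvStepP (acc ++ [c])) =
      acc ++ (List.range (okl.length + 1)).map
        (fun j => c + (((okl.take j).countP (fun b => b) : Nat) : Int)) := by
  induction okl with
  | nil => intro acc c; simp [List.range_succ]
  | cons v rest ih =>
    intro acc c
    rw [List.foldl_cons]
    have hstep : pvStepP (acc ++ [c]) v = (acc ++ [c]) ++ [c + (if v then 1 else 0)] := by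
      simp [pvStepP]
    rw [hstep, ih (acc ++ [c]) (c + (if v then 1 else 0))]
    rw [List.append_assoc]
    congr 1
    have h2 : List.range (rest.length + 1 + 1) = 0 :: (List.range (rest.length + 1)).map Nat.succ :=
      List.range_succ_eq_map
    rw [List.length_cons, h2, List.map_cons]
    simp only [List.take_zero, List.countP_nil, Nat.cast_zero, add_zero, List.singleton_append,
      List.map_map]
    congr 1
    apply List.map_congr_left
    intro j _
    simp only [Function.comp_apply, Nat.succ_eq_add_one, List.take_succ_cons, List.countP_cons]
    cases v <;> simp <;> omega

-- the two existential characterisations coincide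
theorem pv_mem_bridge (lines : List String) (stanza_starts : List Int) (v : Int) :
    v ∈ pvGA (PySem.Set.ofList stanza_starts) lines 0 0 ↔
      v ∈ (PySem.Set.ofList stanza_starts).foldl
            (pvStepB lines (lines.map (fun l => get_end_word_py l != ""))
              ((lines.map (fun l => get_end_word_py l != "")).foldl pvStepP [0])) PySem.Set.empty := by
  rw [pv_gA_mem, pv_foldB_mem]
  have hpref : (lines.map pvValid).foldl pvStepP [0] =
      (List.range ((lines.map pvValid).length + 1)).map
        (fun j => (0 : Int) + ((((lines.map pvValid).take j).countP (fun b => b) : Nat) : Int)) :=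
    pv_pref (lines.map pvValid) [] 0
  have hprefGet : ∀ i : Nat, i < lines.length →
      (PySem.List.pyGet? ((lines.map pvValid).foldl pvStepP [0]) (i : Int)).getD 0
        = ((lines.take i).countP pvValid : Int) := by
    intro i hi
    rw [hpref, PySem.List.pyGet?_natCast]
    rw [List.getElem?_map, List.getElem?_range (by simpa using Nat.lt_succ_of_lt hi)]
    simp only [← List.map_take, List.countP_map, zero_add]
    congr 1
  have hok : lines.map (fun l => get_end_word_py l != "") = lines.map pvValid := rfl
  rw [hok]
  simp only [PySem.Set.mem_ofList, PySem.Set.empty, List.not_mem_nil, false_or]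
  constructor
  · rintro ⟨i, hi, hval, hmem, hv⟩
    refine ⟨(i : Int), by simpa using hmem, ⟨by positivity, by exact_mod_cast hi, ?_⟩, ?_⟩
    · rw [PySem.List.pyGet?_natCast]
      simp only [List.getElem?_map, List.getElem?_eq_getElem hi, Option.map_some, Option.getD_some]
      simpa [List.getD, List.getElem?_eq_getElem hi] using hval
    · rw [hprefGet i hi]
      simpa using hv
  · rintro ⟨s, hmem, ⟨hs0, hsn, hsok⟩, hv⟩
    have hlt : s.toNat < lines.length := by omega
    refine ⟨s.toNat, hlt, ?_, by simpa [Int.toNat_of_nonneg hs0] using hmem, ?_⟩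
    · rw [show s = ((s.toNat : Nat) : Int) from (Int.toNat_of_nonneg hs0).symm] at hsok
      rw [PySem.List.pyGet?_natCast] at hsok
      simp only [List.getElem?_map, List.getElem?_eq_getElem hlt, Option.map_some, Option.getD_some] at hsok
      simpa [List.getD, List.getElem?_eq_getElem hlt] using hsok
    · rw [show s = ((s.toNat : Nat) : Int) from (Int.toNat_of_nonneg hs0).symm, hprefGet s.toNat hlt] at hv
      simpa using hv

-- ===== VERDICT (by name: the statement is the Claim_ definition above) =====
theorem compress_stanza_starts_for_valid_words_py_spec : Claim_equal_compress_stanza_starts_for_valid_words_py := by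
  intro lines stanza_starts _
  unfold Spec_compress_stanza_starts_for_valid_words_py
  unfold compress_stanza_starts_for_valid_words_py compress_stanza_starts_for_valid_words_py_alt
  by_cases hl : lines = []
  · simp [hl]
  · rw [if_neg hl, if_neg hl]
    simp only []
    set S := PySem.Set.ofList stanza_starts with hS
    set ok := lines.map (fun l => get_end_word_py l != "") with hok
    set pref := ok.foldl pvStepP [0] with hpref
    set mapped := S.foldl (pvStepB lines ok pref) PySem.Set.empty with hmapped
    have hfold := pv_foldA S lines 0 [] 0
    rw [hfold]
    simp only [List.nil_append]
    set compA := pvGA S lines 0 0 with hcompA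
    have hbridge : ∀ v, v ∈ compA ↔ v ∈ mapped := fun v => pv_mem_bridge lines stanza_starts v
    have hempty : compA = [] ↔ mapped = [] := by
      rw [List.eq_nil_iff_forall_not_mem, List.eq_nil_iff_forall_not_mem]
      exact ⟨fun h v hv => h v ((hbridge v).mpr hv), fun h v hv => h v ((hbridge v).mp hv)⟩
    by_cases hce : compA = []
    · rw [if_pos hce, if_pos (hempty.mp hce)]
    · rw [if_neg hce, if_neg (fun h => hce (hempty.mpr h))]
      apply PySem.List.sorted_eq_sorted_of_perm _ _ _ (fun a b h => h)
      have hnd1 : (PySem.Set.ofList (if compA.head? ≠ some 0 then 0 :: compA else compA)).Nodup :=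
        PySem.Set.nodup_ofList _
      have hnd2 : (PySem.Set.union mapped [0]).Nodup :=
        PySem.Set.nodup_union _ _ (pv_foldB_nodup lines ok pref S PySem.Set.empty List.nodup_nil)
      rw [List.perm_ext_iff_of_nodup hnd1 hnd2]
      intro a
      rw [PySem.Set.mem_ofList, PySem.Set.mem_union]
      have hmem' : a ∈ (if compA.head? ≠ some 0 then 0 :: compA else compA) ↔ a = 0 ∨ a ∈ compA := by
        by_cases hh : compA.head? ≠ some 0
        · rw [if_pos hh]; simp
        · rw [if_neg hh]
          rw [not_not] at hh
          have h0 : (0 : Int) ∈ compA := List.mem_of_mem_head? hh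
          constructor
          · exact Or.inr
          · rintro (rfl | h); exact h0; assumption
      rw [hmem']
      simp only [List.mem_singleton]
      rw [hbridge a]
      tauto
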